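-- pv_equiv track=rewrite | github.com/roboflow/inference | inference/core/workflows/core_steps/common/utils.py | remove_unexpected_keys_from_dictionary
-- ===== SOURCE A (Python) =====
-- def remove_unexpected_keys_from_dictionary(
--     dictionary: dict,
--     expected_keys: set,
-- ) -> dict:
--     """This function mutates input `dictionary`"""
--     unexpected_keys = set(dictionary.keys()).difference(expected_keys)
--     for unexpected_key in unexpected_keys:
--         del dictionary[unexpected_key]
--     return dictionary
-- ===== SOURCE B (Python) =====
-- def remove_unexpected_keys_from_dictionary(
--     dictionary: dict,
--     expected_keys: set,
-- ) -> dict: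
--     """This function mutates input `dictionary`"""
--     keep = {k: v for k, v in dictionary.items() if k in expected_keys}
--     dictionary.clear()
--     dictionary.update(keep)
--     return dictionary
-- ===== Notes on version B (the rewrite author's own statement) =====
-- stated objective: simpler
-- what changed: B keeps the expected entries with one positive filtering comprehension and rebuilds the same dict via clear()+update(), instead of computing the set of unexpected keys and deleting each in a loop.
import Mathlib
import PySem

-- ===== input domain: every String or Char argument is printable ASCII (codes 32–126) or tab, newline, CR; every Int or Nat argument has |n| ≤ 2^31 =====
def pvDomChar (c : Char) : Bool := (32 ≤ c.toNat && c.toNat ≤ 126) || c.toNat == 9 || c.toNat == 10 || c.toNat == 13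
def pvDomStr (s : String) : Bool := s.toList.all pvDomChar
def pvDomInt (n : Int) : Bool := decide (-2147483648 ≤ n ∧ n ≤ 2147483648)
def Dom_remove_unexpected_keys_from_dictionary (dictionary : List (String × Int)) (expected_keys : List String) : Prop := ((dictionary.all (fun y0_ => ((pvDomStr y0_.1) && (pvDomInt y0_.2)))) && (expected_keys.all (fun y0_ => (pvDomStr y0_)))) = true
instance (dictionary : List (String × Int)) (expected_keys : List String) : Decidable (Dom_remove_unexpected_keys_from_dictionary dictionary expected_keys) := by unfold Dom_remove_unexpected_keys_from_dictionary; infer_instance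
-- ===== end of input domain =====

-- Header: B keeps expected entries with one positive filtering pass (clear+update on the
-- same dict object), instead of A's set-difference of keys followed by per-key deletion; simpler.
-- A iterates a Python set only to delete keys, so the result is order-independent and exact.
-- ===== PORT A =====
def remove_unexpected_keys_from_dictionary (dictionary : List (String × Int)) (expected_keys : List String) : List (String × Int) :=
  let unexpected_keys : PySem.Set String :=
    PySem.Set.diff (PySem.Set.ofList (dictionary.map (·.1))) expected_keys
  unexpected_keys.foldl (fun d unexpected_key => d.filter (fun kv => kv.1 != unexpected_key)) dictionary

-- ===== PORT B =====
def remove_unexpected_keys_from_dictionary_alt (dictionary : List (String × Int)) (expected_keys : List String) : List (String × Int) :=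
  dictionary.filter (fun kv => expected_keys.contains kv.1)

-- ===== PRECONDITION & SPEC =====
def Spec_remove_unexpected_keys_from_dictionary (dictionary : List (String × Int)) (expected_keys : List String) (out : List (String × Int)) : Prop := out = remove_unexpected_keys_from_dictionary_alt dictionary expected_keys
instance (dictionary : List (String × Int)) (expected_keys : List String) (out : List (String × Int)) : Decidable (Spec_remove_unexpected_keys_from_dictionary dictionary expected_keys out) := by unfold Spec_remove_unexpected_keys_from_dictionary; infer_instance

-- ===== CLAIM =====
def Claim_equal_remove_unexpected_keys_from_dictionary : Prop := ∀ (dictionary : List (String × Int)) (expected_keys : List String), Dom_remove_unexpected_keys_from_dictionary dictionary expected_keys → Spec_remove_unexpected_keys_from_dictionary dictionary expected_keys (remove_unexpected_keys_from_dictionary dictionary expected_keys)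

-- ===== LEMMAS AND PROOFS =====
-- Folding per-key deletions over a key list equals one filter by non-membership.
theorem foldl_filter_ne (ks : List String) (d : List (String × Int)) :
    ks.foldl (fun d k => d.filter (fun kv => kv.1 != k)) d
      = d.filter (fun kv => !ks.contains kv.1) := by
  induction ks generalizing d with
  | nil => simp
  | cons k ks ih =>
      simp only [List.foldl_cons, ih, List.filter_filter]
      apply List.filter_congr
      intro kv _
      cases h : (kv.1 == k) <;> simp_all [Bool.and_comm]

-- ===== VERDICT =====
theorem remove_unexpected_keys_from_dictionary_spec : Claim_equal_remove_unexpected_keys_from_dictionary := by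
  intro dictionary expected_keys _
  show _ = _
  unfold remove_unexpected_keys_from_dictionary remove_unexpected_keys_from_dictionary_alt
  rw [foldl_filter_ne]
  apply List.filter_congr
  intro kv hkv
  have hk : kv.1 ∈ dictionary.map (·.1) := List.mem_map.mpr ⟨kv, hkv, rfl⟩
  by_cases h : kv.1 ∈ expected_keys <;>
    simp [PySem.Set.mem_diff, PySem.Set.mem_ofList, hk, h]
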